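-- pv_equiv track=rewrite | github.com/ElainaJourney/Duplicates-code-challenge | main.py | find_dupe
-- ===== SOURCE A (Python) =====
-- def find_dupe(alist):
--     placeholder = []
--     for a in alist:
--         for b in alist:
--             if a == b:
--                 placeholder.append(b)
--             else:
--                 pass
--     return placeholder
-- ===== SOURCE B (Python) =====
-- def find_dupe(alist):
--     counts = {}
--     for a in alist:
--         counts[a] = counts.get(a, 0) + 1
--     out = []
--     for a in alist:
--         out.extend([a] * counts[a])
--     return out
-- ===== Notes on version B (the rewrite author's own statement) =====
-- stated objective: alternative
-- what changed: replaced the quadratic nested scan with a one-pass count dictionary followed by emitting each element repeated its count; cost is dominated by the output size in both, so the scan removal is a structural change, not a measured speed-up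
import Mathlib
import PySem

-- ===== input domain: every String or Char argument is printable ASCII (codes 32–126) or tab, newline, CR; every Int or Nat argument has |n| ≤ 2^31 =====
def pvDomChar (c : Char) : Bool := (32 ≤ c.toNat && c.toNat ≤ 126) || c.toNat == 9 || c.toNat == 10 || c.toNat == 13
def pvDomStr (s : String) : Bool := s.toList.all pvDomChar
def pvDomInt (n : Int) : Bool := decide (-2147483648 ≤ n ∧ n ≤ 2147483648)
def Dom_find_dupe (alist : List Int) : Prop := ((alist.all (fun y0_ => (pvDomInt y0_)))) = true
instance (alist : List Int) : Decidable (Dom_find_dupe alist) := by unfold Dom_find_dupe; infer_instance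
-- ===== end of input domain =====

-- B replaces A's nested scan with a one-pass count dictionary, then emits each element
-- repeated its count (alternative structure; cost is dominated by the output size in both).


-- ===== PORT A =====
def find_dupe (alist : List Int) : List Int :=
  alist.foldl (fun placeholder a =>
    alist.foldl (fun placeholder b =>
      if a == b then placeholder ++ [b] else placeholder) placeholder) []

-- ===== PORT B =====
def find_dupe_alt (alist : List Int) : List Int :=
  let counts := alist.foldl (fun d a => d.insert a (d.getD a 0 + 1)) (PySem.Dict.empty : PySem.Dict Int Int)
  alist.foldl (fun out a => out ++ PySem.List.pyRepeat [a] (counts.getD a 0)) []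

-- ===== PRECONDITION & SPEC =====
def Spec_find_dupe (alist : List Int) (out : List Int) : Prop := out = find_dupe_alt alist
instance (alist : List Int) (out : List Int) : Decidable (Spec_find_dupe alist out) := by unfold Spec_find_dupe; infer_instance

-- ===== CLAIM (what is proved, stated in full; the proofs are below) =====
def Claim_equal_find_dupe : Prop := ∀ (alist : List Int), Dom_find_dupe alist → Spec_find_dupe alist (find_dupe alist)

-- ===== LEMMAS AND PROOFS =====

theorem filter_beq_eq_replicate (alist : List Int) (a : Int) :
    alist.filter (fun b => a == b) = List.replicate (alist.count a) a := by
  induction alist with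
  | nil => simp
  | cons x xs ih =>
      by_cases h : a = x
      · subst h
        simp [ih, List.replicate_succ]
      · simp [Ne.symm h, h, ih]

theorem find_dupe_eq (alist : List Int) :
    find_dupe alist = alist.flatMap (fun a => List.replicate (alist.count a) a) := by
  unfold find_dupe
  have h1 : ∀ (acc : List Int),
      alist.foldl (fun placeholder a =>
        alist.foldl (fun placeholder b =>
          if a == b then placeholder ++ [b] else placeholder) placeholder) acc
      = alist.foldl (fun placeholder a =>
          placeholder ++ List.replicate (alist.count a) a) acc := by
    intro acc
    apply PySem.List.foldl_congr_mem
    intro ph a _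
    rw [PySem.List.foldl_append_if_eq_filter, filter_beq_eq_replicate]
  rw [h1, PySem.List.foldl_append_eq_flatMap]
  simp

theorem find_dupe_alt_eq (alist : List Int) :
    find_dupe_alt alist = alist.flatMap (fun a => List.replicate (alist.count a) a) := by
  unfold find_dupe_alt
  rw [PySem.Dict.foldl_insert_getD_add_one_eq_counter]
  have h1 : ∀ (acc : List Int),
      alist.foldl (fun out a => out ++ PySem.List.pyRepeat [a] ((PySem.Dict.counter alist).getD a 0)) acc
      = alist.foldl (fun out a => out ++ List.replicate (alist.count a) a) acc := by
    intro acc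
    apply PySem.List.foldl_congr_mem
    intro out a _
    rw [PySem.Dict.getD_counter, PySem.List.pyRepeat_singleton]
    simp
  rw [h1, PySem.List.foldl_append_eq_flatMap]
  simp

-- ===== VERDICT (by name: the statement is the Claim_ definition above) =====
theorem find_dupe_spec : Claim_equal_find_dupe := by
  intro alist _
  unfold Spec_find_dupe
  rw [find_dupe_eq, find_dupe_alt_eq]
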